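-- pv_equiv track=rewrite | github.com/DDVD233/mirl | multi_task_classification/label_maps/unify_labels.py | longest_prefix_parse
-- ===== SOURCE A (Python) =====
-- def longest_prefix_parse(key: str, known_datasets):
--     """
--     Parse 'dataset_...' using the LONGEST matching dataset name as prefix.
--     Returns (dataset, tail) or (None, original_key) if no match.
--     """
--     for ds in sorted(known_datasets, key=len, reverse=True):
--         prefix = ds + "_"
--         if key.startswith(prefix):
--             return ds, key[len(prefix):]
--         if key == ds:  # degenerate case
--             return ds, ""
--     return None, key
-- ===== SOURCE B (Python) =====
-- def longest_prefix_parse(key: str, known_datasets):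
--     """Single linear pass: keep the longest dataset that matches key
--     (either exactly or as 'ds_' prefix); no sorting."""
--     best = None
--     for ds in known_datasets:
--         if (best is None or len(ds) > len(best)) and \
--            (key == ds or key.startswith(ds + "_")):
--             best = ds
--     if best is None:
--         return None, key
--     return best, key[len(best) + 1:]
-- ===== Notes on version B (the rewrite author's own statement) =====
-- stated objective: faster
-- what changed: B replaces A's sort-by-length-then-scan with a single linear pass that keeps the longest dataset matching key (exactly or as 'ds_' prefix); the longest matcher is unique, so the result is identical.
import Mathlib
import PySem

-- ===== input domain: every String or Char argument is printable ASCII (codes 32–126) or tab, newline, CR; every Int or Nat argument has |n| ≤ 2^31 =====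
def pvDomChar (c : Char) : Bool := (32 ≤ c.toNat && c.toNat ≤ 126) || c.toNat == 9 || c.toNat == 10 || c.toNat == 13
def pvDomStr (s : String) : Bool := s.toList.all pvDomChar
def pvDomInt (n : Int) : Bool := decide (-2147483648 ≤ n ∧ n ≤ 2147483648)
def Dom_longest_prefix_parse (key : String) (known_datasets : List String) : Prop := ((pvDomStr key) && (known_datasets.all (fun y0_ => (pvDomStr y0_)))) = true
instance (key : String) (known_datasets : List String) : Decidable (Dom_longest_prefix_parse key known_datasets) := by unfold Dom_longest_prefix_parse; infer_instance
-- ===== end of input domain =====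

-- B replaces A's sort-by-length-then-scan with one linear pass keeping the longest
-- matching dataset (objective: faster, O(n) prefix tests instead of a sort).

-- ===== PORT A =====
-- A's loop over the length-descending sorted list (strings as char lists).
def pvAGo (key : List Char) : List (List Char) → Option (List Char) × List Char
  | [] => (none, key)
  | ds :: rest =>
    let pre := ds ++ ['_']
    if PySem.Chars.startswith key pre then
      (some ds, PySem.Chars.slice key (some (PySem.Chars.len pre)) none)
    else if key = ds then (some ds, [])
    else pvAGo key rest

def longest_prefix_parse (key : String) (known_datasets : List String) : Option String × String :=
  let r := pvAGo key.toList
      (PySem.List.sorted (known_datasets.map String.toList) PySem.Chars.len true)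
  match r with
  | (none, _) => (none, key)
  | (some b, t) => (some (String.ofList b), String.ofList t)

-- ===== PORT B =====
-- B's single-pass step: keep ds iff it is strictly longer than the best so far and matches key.
def pvBStep (key : List Char) (best : Option (List Char)) (ds : List Char) : Option (List Char) :=
  if (match best with | none => true | some b => decide (b.length < ds.length))
      && (decide (key = ds) || PySem.Chars.startswith key (ds ++ ['_'])) then some ds
  else best

def longest_prefix_parse_alt (key : String) (known_datasets : List String) : Option String × String :=
  match (known_datasets.map String.toList).foldl (pvBStep key.toList) none with
  | none => (none, key)
  | some b =>
    (some (String.ofList b),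
     String.ofList (PySem.Chars.slice key.toList (some (PySem.Chars.len b + 1)) none))

-- ===== PRECONDITION & SPEC =====
def Spec_longest_prefix_parse (key : String) (known_datasets : List String) (out : Option String × String) : Prop := out = longest_prefix_parse_alt key known_datasets
instance (key : String) (known_datasets : List String) (out : Option String × String) : Decidable (Spec_longest_prefix_parse key known_datasets out) := by unfold Spec_longest_prefix_parse; infer_instance

-- ===== CLAIM (what is proved, stated in full; the proofs are below) =====
def Claim_equal_longest_prefix_parse : Prop := ∀ (key : String) (known_datasets : List String), Dom_longest_prefix_parse key known_datasets → Spec_longest_prefix_parse key known_datasets (longest_prefix_parse key known_datasets)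

-- ===== LEMMAS AND PROOFS =====

-- "ds matches key" (the test both programs perform).
def pvMt (key ds : List Char) : Bool :=
  decide (key = ds) || PySem.Chars.startswith key (ds ++ ['_'])

theorem pvMt_iff (key ds : List Char) :
    pvMt key ds = true ↔ key = ds ∨ (ds ++ ['_']) <+: key := by
  simp [pvMt, PySem.Chars.startswith_iff]

-- Two matchers of equal length are equal.
theorem pvMt_uniq {k a b : List Char} (ha : pvMt k a = true) (hb : pvMt k b = true)
    (h : a.length = b.length) : a = b := by
  rw [pvMt_iff] at ha hb
  rcases ha with ha | ha <;> rcases hb with hb | hb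
  · exact ha ▸ hb.symm ▸ rfl
  · exfalso
    have h1 := hb.length_le; simp at h1
    have h2 : k.length = a.length := by rw [ha]
    omega
  · exfalso
    have h1 := ha.length_le; simp at h1
    have h2 : k.length = b.length := by rw [hb]
    omega
  · have : a ++ ['_'] = b ++ ['_'] :=
      (List.prefix_of_prefix_length_le ha hb (by simp [h])).eq_of_length (by simp [h])
    exact List.append_cancel_right this

theorem pvSlice_drop (k : List Char) (n : Nat) :
    PySem.List.slice k (some ((n : Int) + 1)) none = k.drop (n + 1) := by
  have h : (n : Int) + 1 = ((n + 1 : Nat) : Int) := by push_cast; ring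
  rw [h, PySem.List.slice_from_natCast]

-- A's loop is "first matcher of the list", with a uniform tail.
theorem pvAGo_eq_find (key : List Char) (l : List (List Char)) :
    pvAGo key l = match l.find? (pvMt key) with
      | none => (none, key)
      | some b => (some b, key.drop (b.length + 1)) := by
  induction l with
  | nil => rfl
  | cons ds rest ih =>
    by_cases hs : PySem.Chars.startswith key (ds ++ ['_']) = true
    · have hm : pvMt key ds = true := by simp [pvMt, hs]
      simp [pvAGo, hs, List.find?, hm, PySem.Chars.len_eq,
        PySem.Chars.slice_eq_listSlice, pvSlice_drop]
    · by_cases he : key = ds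
      · subst he
        have hm : pvMt key key = true := by simp [pvMt]
        have hd : key.drop (key.length + 1) = [] :=
          List.drop_eq_nil_of_le (by omega)
        simp [pvAGo, hs, List.find?, hm, hd]
      · have hm : pvMt key ds = false := by simp [pvMt, he, hs]
        simp [pvAGo, hs, he, List.find?, hm, ih]

-- find? on the length-descending sorted list returns a matcher of maximal length.
theorem pvFind_sorted_none (key : List Char) (l : List (List Char))
    (h : (PySem.List.sorted l PySem.Chars.len true).find? (pvMt key) = none) :
    ∀ x ∈ l, pvMt key x = false := by
  intro x hx
  have := List.find?_eq_none.mp h x (by rw [PySem.List.mem_sorted]; exact hx)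
  simpa using this

theorem pvFind_sorted_some (key : List Char) (l : List (List Char)) (b : List Char)
    (h : (PySem.List.sorted l PySem.Chars.len true).find? (pvMt key) = some b) :
    pvMt key b = true ∧ b ∈ l ∧ ∀ x ∈ l, pvMt key x = true → x.length ≤ b.length := by
  obtain ⟨hb, as, bs, hsplit, hpre⟩ := List.find?_eq_some_iff_append.mp h
  have hmem : b ∈ l := by
    rw [← PySem.List.mem_sorted (key := PySem.Chars.len) (rev := true), hsplit]
    simp
  refine ⟨hb, hmem, ?_⟩
  intro x hx hmx
  have hxs : x ∈ as ++ b :: bs := by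
    rw [← hsplit, PySem.List.mem_sorted]; exact hx
  have hpw : (as ++ b :: bs).Pairwise
      (fun a c => PySem.Chars.len c ≤ PySem.Chars.len a) := by
    rw [← hsplit]; exact PySem.List.sorted_pairwise_rev l PySem.Chars.len
  rcases List.mem_append.mp hxs with hxa | hxc
  · exact absurd hmx (by simpa using hpre x hxa)
  · rcases List.mem_cons.mp hxc with rfl | hxbs
    · exact le_refl x.length
    · have := (List.pairwise_cons.mp (List.pairwise_append.mp hpw).2.1).1 x hxbs
      simpa [PySem.Chars.len_eq] using this

-- B's fold keeps a matcher of maximal length.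
theorem pvFoldB_spec (key : List Char) (l : List (List Char)) :
    ∀ acc : Option (List Char),
    (l.foldl (pvBStep key) acc = none → acc = none ∧ ∀ x ∈ l, pvMt key x = false) ∧
    (∀ b, l.foldl (pvBStep key) acc = some b →
      (acc = some b ∨ (pvMt key b = true ∧ b ∈ l)) ∧
      (∀ x ∈ l, pvMt key x = true → x.length ≤ b.length) ∧
      (∀ a, acc = some a → a.length ≤ b.length)) := by
  induction l with
  | nil =>
    intro acc
    constructor
    · intro h; exact ⟨h, by simp⟩
    · intro b h
      refine ⟨Or.inl h, by simp, fun a ha => ?_⟩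
      rw [ha] at h; injection h with h; rw [h]
  | cons d rest ih =>
    intro acc
    by_cases hc : ((match acc with | none => true | some b => decide (b.length < d.length))
        && (decide (key = d) || PySem.Chars.startswith key (d ++ ['_']))) = true
    · -- step takes d
      have hacc' : pvBStep key acc d = some d := by simp [pvBStep, hc]
      have hmd : pvMt key d = true := by
        simp only [Bool.and_eq_true] at hc; simpa [pvMt] using hc.2
      have hlt : ∀ a, acc = some a → a.length < d.length := by
        intro a ha; subst ha
        simp only [Bool.and_eq_true] at hc
        simpa using hc.1
      constructor
      · intro h
        rw [List.foldl_cons, hacc'] at h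
        exact absurd ((ih (some d)).1 h).1 (by simp)
      · intro b h
        rw [List.foldl_cons, hacc'] at h
        obtain ⟨h1, h2, h3⟩ := (ih (some d)).2 b h
        have hdb : d.length ≤ b.length := h3 d rfl
        refine ⟨?_, ?_, ?_⟩
        · rcases h1 with h1 | ⟨hm, hmem⟩
          · have : d = b := by injection h1
            exact Or.inr ⟨this ▸ hmd, by simp [this]⟩
          · exact Or.inr ⟨hm, by simp [hmem]⟩
        · intro x hx hmx
          rcases List.mem_cons.mp hx with rfl | hx
          · exact hdb
          · exact h2 x hx hmx
        · intro a ha; exact le_of_lt (lt_of_lt_of_le (hlt a ha) hdb)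
    · -- step keeps acc
      have hacc' : pvBStep key acc d = acc := by simp [pvBStep, hc]
      constructor
      · intro h
        rw [List.foldl_cons, hacc'] at h
        obtain ⟨h1, h2⟩ := (ih acc).1 h
        refine ⟨h1, ?_⟩
        intro x hx
        rcases List.mem_cons.mp hx with rfl | hx
        · -- acc = none, so the condition reduces to pvMt
          subst h1
          simpa [pvMt] using hc
        · exact h2 x hx
      · intro b h
        rw [List.foldl_cons, hacc'] at h
        obtain ⟨h1, h2, h3⟩ := (ih acc).2 b h
        refine ⟨?_, ?_, h3⟩
        · rcases h1 with h1 | ⟨hm, hmem⟩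
          · exact Or.inl h1
          · exact Or.inr ⟨hm, by simp [hmem]⟩
        · intro x hx hmx
          rcases List.mem_cons.mp hx with rfl | hx
          · -- pvMt key x true but condition false: acc = some a with x.length ≤ a.length
            rcases hacc0 : acc with _ | a
            · subst hacc0; simp [pvMt] at hmx; simp [hmx] at hc
            · have hle : x.length ≤ a.length := by
                subst hacc0
                simp only [Bool.and_eq_true, not_and, decide_eq_true_eq] at hc
                have : ¬ a.length < x.length := by
                  intro hlt
                  exact hc (by simpa using hlt) (by simpa [pvMt] using hmx)
                omega
              exact le_trans hle (h3 a hacc0)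
          · exact h2 x hx hmx

-- ===== VERDICT (by name: the statement is the Claim_ definition above) =====
theorem longest_prefix_parse_spec : Claim_equal_longest_prefix_parse := by
  intro key kds _
  unfold Spec_longest_prefix_parse longest_prefix_parse longest_prefix_parse_alt
  set k := key.toList with hk
  set L := kds.map String.toList with hL
  rw [pvAGo_eq_find]
  rcases hF : (PySem.List.sorted L PySem.Chars.len true).find? (pvMt k) with _ | bA
  · -- no matcher: B's fold must be none
    have hno := pvFind_sorted_none k L hF
    rcases hB : L.foldl (pvBStep k) none with _ | bB
    · simp
    · obtain ⟨h1, _, _⟩ := (pvFoldB_spec k L none).2 bB hB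
      rcases h1 with h1 | ⟨hm, hmem⟩
      · exact absurd h1 (by simp)
      · exact absurd hm (by simp [hno bB hmem])
  · obtain ⟨hmA, hmemA, hmaxA⟩ := pvFind_sorted_some k L bA hF
    rcases hB : L.foldl (pvBStep k) none with _ | bB
    · exact absurd hmA (by simp [((pvFoldB_spec k L none).1 hB).2 bA hmemA])
    · obtain ⟨h1, hmaxB, _⟩ := (pvFoldB_spec k L none).2 bB hB
      rcases h1 with h1 | ⟨hmB, hmemB⟩
      · exact absurd h1 (by simp)
      · have hlen : bA.length = bB.length :=
          le_antisymm (hmaxB bA hmemA hmA) (hmaxA bB hmemB hmB)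
        have hab : bA = bB := pvMt_uniq hmA hmB hlen
        subst hab
        simp [PySem.Chars.slice_eq_listSlice, PySem.Chars.len_eq, pvSlice_drop]
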